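-- pv_equiv track=rewrite | github.com/darrencheng0817/AlgorithmLearning | Python/interview/wayfair/wayfair.py | sort2
-- ===== SOURCE A (Python) =====
-- def sort2(nums):
--     index_p=0
--     index=0
--     while index<len(nums):
--         if nums[index]>=0:
--             temp=nums[index]
--             nums.pop(index)
--             nums.insert(index_p,temp)
--             index_p+=1
--         index+=1
--     return nums
--
-- nums=[-2,1,2,-3,4,3,2,0,-1,-3,-5,1,-4,5]
-- ===== SOURCE B (Python) =====
-- def sort2(nums):
--     nums[:] = [x for x in nums if x >= 0] + [x for x in nums if x < 0]
--     return nums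
-- ===== Notes on version B (the rewrite author's own statement) =====
-- stated objective: simpler
-- what changed: Replaces the quadratic pop/insert shuffle loop with two list comprehensions (non-negatives then negatives) assigned back in place via nums[:].
import Mathlib
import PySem

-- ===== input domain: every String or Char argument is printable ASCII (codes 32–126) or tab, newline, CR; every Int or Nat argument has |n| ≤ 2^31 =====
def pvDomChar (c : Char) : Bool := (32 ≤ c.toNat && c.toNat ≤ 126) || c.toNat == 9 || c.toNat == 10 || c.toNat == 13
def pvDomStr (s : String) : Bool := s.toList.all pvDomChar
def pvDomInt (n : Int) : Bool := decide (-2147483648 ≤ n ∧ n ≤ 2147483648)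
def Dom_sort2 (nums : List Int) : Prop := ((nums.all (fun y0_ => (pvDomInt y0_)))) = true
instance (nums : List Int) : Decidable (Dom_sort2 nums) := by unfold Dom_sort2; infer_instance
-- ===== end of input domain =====

-- B replaces A's quadratic pop/insert shuffle by two comprehensions (non-negatives then
-- negatives) written back in place; both Pythons mutate the argument the same way, the
-- theorems here are about the returned value.

-- ===== PORT A =====
-- A's while loop: fuel = nums.length suffices, since the length never changes and
-- index increases by one each iteration.
def sort2Loop : Nat → List Int → Nat → Nat → List Int
  | 0, nums, _, _ => nums
  | fuel + 1, nums, index_p, index =>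
    if index < nums.length then
      match PySem.List.pyGet? nums (index : Int) with
      | none => nums          -- unreachable: index < len(nums)
      | some v =>
        if 0 ≤ v then
          match PySem.List.pop? nums (index : Int) with
          | none => nums      -- unreachable: index < len(nums)
          | some (temp, rest) =>
            sort2Loop fuel (PySem.List.insert rest (index_p : Int) temp) (index_p + 1) (index + 1)
        else
          sort2Loop fuel nums index_p (index + 1)
    else nums

def sort2 (nums : List Int) : List Int := sort2Loop nums.length nums 0 0

-- ===== PORT B =====
def sort2_alt (nums : List Int) : List Int :=
  nums.filter (fun x => decide (0 ≤ x)) ++ nums.filter (fun x => decide (x < 0))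

-- ===== PRECONDITION & SPEC =====
def Spec_sort2 (nums : List Int) (out : List Int) : Prop := out = sort2_alt nums
instance (nums : List Int) (out : List Int) : Decidable (Spec_sort2 nums out) := by unfold Spec_sort2; infer_instance

-- ===== CLAIM (what is proved, stated in full; the proofs are below) =====
def Claim_equal_sort2 : Prop := ∀ (nums : List Int), Dom_sort2 nums → Spec_sort2 nums (sort2 nums)

-- ===== LEMMAS AND PROOFS =====

-- nums[p+len(B)] on pre = P ++ B ++ v::C picks v
theorem pv_pyGet_mid (P B C : List Int) (v : Int) :
    PySem.List.pyGet? (P ++ B ++ v :: C) (((P.length + B.length : Nat)) : Int) = some v := by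
  have : P ++ B ++ v :: C = (P ++ B) ++ v :: C := by simp
  rw [this]
  have h := PySem.List.pyGet?_append_length (P ++ B) C v
  simpa using h

theorem pv_pop_mid (P B C : List Int) (v : Int) :
    PySem.List.pop? (P ++ B ++ v :: C) (((P.length + B.length : Nat)) : Int)
      = some (v, P ++ B ++ C) := by
  have hlt : P.length + B.length < (P ++ B ++ v :: C).length := by simp
  rw [PySem.List.pop?_natCast _ _ hlt]
  congr 1
  have h1 : (P ++ B ++ v :: C)[P.length + B.length] = v := by
    have : P ++ B ++ v :: C = (P ++ B) ++ v :: C := by simp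
    simp [List.getElem_append_right]
  have h2 : (P ++ B ++ v :: C).eraseIdx (P.length + B.length) = P ++ B ++ C := by
    have : P ++ B ++ v :: C = (P ++ B) ++ v :: C := by simp
    rw [this, List.eraseIdx_append_of_length_le (by simp)]
    simp
  rw [h1, h2]

theorem pv_insert_at (P R : List Int) (v : Int) :
    PySem.List.insert (P ++ R) ((P.length : Nat) : Int) v = P ++ v :: R := by
  rw [PySem.List.insert_natCast _ _ _ (by simp)]
  simp

-- Loop invariant: with the list split as P ++ B ++ C (P the moved non-negatives, B the
-- negatives seen so far, C unprocessed), the loop returns P ++ (nonnegs of C) ++ B ++ (negs of C).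
theorem pv_loop_eq (C : List Int) : ∀ (P B : List Int) (fuel : Nat), C.length ≤ fuel →
    sort2Loop fuel (P ++ B ++ C) P.length (P.length + B.length)
      = P ++ C.filter (fun x => decide (0 ≤ x)) ++ B ++ C.filter (fun x => decide (x < 0)) := by
  induction C with
  | nil =>
    intro P B fuel _
    cases fuel with
    | zero => simp [sort2Loop]
    | succ n => simp [sort2Loop]
  | cons v C' ih =>
    intro P B fuel hfuel
    cases fuel with
    | zero => simp at hfuel
    | succ n =>
      have hlt : P.length + B.length < (P ++ B ++ v :: C').length := by simp
      rw [sort2Loop, if_pos hlt, pv_pyGet_mid]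
      dsimp only
      by_cases hv : 0 ≤ v
      · rw [if_pos hv, pv_pop_mid]
        dsimp only
        have hins : PySem.List.insert (P ++ B ++ C') ((P.length : Nat) : Int) v
            = (P ++ [v]) ++ B ++ C' := by
          have : P ++ B ++ C' = P ++ (B ++ C') := by simp
          rw [this, pv_insert_at]
          simp
        rw [hins]
        have hidx : P.length + B.length + 1 = (P ++ [v]).length + B.length := by
          simp; omega
        have hp : P.length + 1 = (P ++ [v]).length := by simp
        rw [hidx, hp, ih (P ++ [v]) B n (by simpa using Nat.lt_succ_iff.mp hfuel)]
        simp [hv, not_lt.mpr hv]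
      · rw [if_neg hv]
        replace hv := lt_of_not_ge hv
        have hidx : P.length + B.length + 1 = P.length + (B ++ [v]).length := by
          simp; omega
        have hsplit : P ++ B ++ v :: C' = P ++ (B ++ [v]) ++ C' := by simp
        rw [hidx, hsplit, ih P (B ++ [v]) n (by simpa using Nat.lt_succ_iff.mp hfuel)]
        simp [hv, not_le.mpr hv]

-- ===== VERDICT (by name: the statement is the Claim_ definition above) =====
theorem sort2_spec : Claim_equal_sort2 := by
  intro nums _
  unfold Spec_sort2 sort2 sort2_alt
  have := pv_loop_eq nums [] [] nums.length (le_refl _)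
  simpa using this
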